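-- pv_equiv track=rewrite | github.com/hotteok00/Algorithm | 프로그래머스/1/42840. 모의고사/모의고사.py | solution
-- ===== SOURCE A (Python) =====
-- def solution(answers):
--     answer = [-1, 0, 0, 0]
--
--     num1 = [1, 2, 3, 4, 5]
--     num2 = [2, 1, 2, 3, 2, 4, 2, 5]
--     num3 = [3, 3, 1, 1, 2, 2, 4, 4, 5, 5]
--
--     for i in range(len(answers)):
--         if num1[i % len(num1)] == answers[i]: answer[1] += 1
--         if num2[i % len(num2)] == answers[i]: answer[2] += 1
--         if num3[i % len(num3)] == answers[i]: answer[3] += 1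
--
--     result = []
--
--     max_score = answer[0]
--     for i in range(1, 4):
--         if max_score < answer[i]:
--             result.clear()
--             result.append(i)
--             max_score = answer[i]
--         elif max_score == answer[i]:
--             result.append(i)
--
--     return result
-- ===== SOURCE B (Python) =====
-- def solution(answers):
--     num1 = [1, 2, 3, 4, 5]
--     num2 = [2, 1, 2, 3, 2, 4, 2, 5]
--     num3 = [3, 3, 1, 1, 2, 2, 4, 4, 5, 5]
--     # All three patterns repeat with period 40 (lcm of 5, 8, 10), so bucket the
--     # answers once by (position mod 40, value); each score is then 40 table
--     # lookups, with no per-pattern scan of the answers.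
--     cnt = {}
--     for i, a in enumerate(answers):
--         k = (i % 40, a)
--         cnt[k] = cnt.get(k, 0) + 1
--     scores = [sum(cnt.get((r, pat[r % len(pat)]), 0) for r in range(40))
--               for pat in (num1, num2, num3)]
--     m = max(scores)
--     return [k + 1 for k in range(3) if scores[k] == m]
-- ===== Notes on version B (the rewrite author's own statement) =====
-- stated objective: alternative
-- what changed: Instead of comparing every answer against all three patterns in one interleaved loop with a running max/clear/append accumulator, B buckets the answers once into a dictionary keyed by (index mod 40, value) (40 = lcm of the pattern lengths) and reads each pattern's score off as 40 table lookups, then selects winners by max-then-filter.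
import Mathlib
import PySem

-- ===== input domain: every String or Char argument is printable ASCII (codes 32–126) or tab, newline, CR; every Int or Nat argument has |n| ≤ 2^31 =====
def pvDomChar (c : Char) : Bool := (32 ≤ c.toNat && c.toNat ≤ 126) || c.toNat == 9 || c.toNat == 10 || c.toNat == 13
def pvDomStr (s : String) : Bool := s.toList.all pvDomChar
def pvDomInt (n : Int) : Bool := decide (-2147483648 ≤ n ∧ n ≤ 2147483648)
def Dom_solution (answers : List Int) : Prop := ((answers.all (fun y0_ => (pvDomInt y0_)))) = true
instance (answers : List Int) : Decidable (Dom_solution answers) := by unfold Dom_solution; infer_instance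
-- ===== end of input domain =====

-- B replaces A's interleaved per-element pattern comparisons by a single bucketing pass
-- keyed by (index mod 40, answer) — 40 = lcm of the pattern lengths — from which each
-- score is 40 dictionary lookups; selection is max-then-filter instead of A's
-- running max/clear/append accumulator (alternative decomposition, same cost).

-- the three fixed answer patterns (shared data of both programs)
def pvNum1 : List Int := [1, 2, 3, 4, 5]
def pvNum2 : List Int := [2, 1, 2, 3, 2, 4, 2, 5]
def pvNum3 : List Int := [3, 3, 1, 1, 2, 2, 4, 4, 5, 5]

-- "pat[i % len(pat)]" (exact: the relevant indices are nonnegative so % and [] are in range)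
def pvPatAt (pat : List Int) (i : Int) : Int :=
  PySem.List.pyGetD pat (PySem.Int.mod i (pat.length : Int)) 0

-- "pat[i % len(pat)] == answers[i]" for the enumerated pair p = (i, answers[i])
def pvHit (pat : List Int) (p : Int × Int) : Bool := pvPatAt pat p.1 == p.2

-- ===== PORT A =====
def solution (answers : List Int) : List Int :=
  -- answer = [-1, 0, 0, 0]; counting loop over range(len(answers)) carried as the triple (answer[1], answer[2], answer[3])
  let c := (PySem.List.enumerate answers 0).foldl
    (fun (a : Int × Int × Int) p =>
      ((if pvHit pvNum1 p then a.1 + 1 else a.1),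
       (if pvHit pvNum2 p then a.2.1 + 1 else a.2.1),
       (if pvHit pvNum3 p then a.2.2 + 1 else a.2.2))) (0, 0, 0)
  -- result/max_score loop over i in range(1, 4), seeded with answer[0] = -1
  (([((1 : Int), c.1), (2, c.2.1), (3, c.2.2)]).foldl
    (fun (st : Int × List Int) q =>
      if st.1 < q.2 then (q.2, [q.1])
      else if st.1 == q.2 then (st.1, st.2 ++ [q.1])
      else st) (-1, [])).2

-- ===== PORT B =====
-- the bucketing loop: cnt[(i % 40, a)] = cnt.get((i % 40, a), 0) + 1
def pvBucket (answers : List Int) : PySem.Dict (Int × Int) Int :=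
  (PySem.List.enumerate answers 0).foldl
    (fun d p =>
      let k := (PySem.Int.mod p.1 40, p.2)
      d.insert k (d.getD k 0 + 1)) PySem.Dict.empty

-- sum(cnt.get((r, pat[r % len(pat)]), 0) for r in range(40))
def pvScore (cnt : PySem.Dict (Int × Int) Int) (pat : List Int) : Int :=
  ((PySem.List.pyRange 0 40 1).map (fun r => cnt.getD (r, pvPatAt pat r) 0)).sum

def solution_alt (answers : List Int) : List Int :=
  let cnt := pvBucket answers
  let scores : List Int := [pvScore cnt pvNum1, pvScore cnt pvNum2, pvScore cnt pvNum3]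
  let m := (PySem.List.max? scores (fun y => y)).getD 0
  ((List.range 3).filter (fun k => scores.getD k 0 == m)).map (fun k => (k : Int) + 1)

-- ===== PRECONDITION & SPEC =====
def Spec_solution (answers : List Int) (out : List Int) : Prop := out = solution_alt answers
instance (answers : List Int) (out : List Int) : Decidable (Spec_solution answers out) := by unfold Spec_solution; infer_instance

-- ===== CLAIM (what is proved, stated in full; the proofs are below) =====
def Claim_equal_solution : Prop := ∀ (answers : List Int), Dom_solution answers → Spec_solution answers (solution answers)

-- ===== LEMMAS AND PROOFS =====

-- A's interleaved counting fold computes the three independent filter-counts.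
theorem pv_count_fold (l : List (Int × Int)) (a b c : Int) :
    l.foldl
      (fun (a : Int × Int × Int) p =>
        ((if pvHit pvNum1 p then a.1 + 1 else a.1),
         (if pvHit pvNum2 p then a.2.1 + 1 else a.2.1),
         (if pvHit pvNum3 p then a.2.2 + 1 else a.2.2))) (a, b, c)
    = (a + ((l.filter (pvHit pvNum1)).length : Int),
       b + ((l.filter (pvHit pvNum2)).length : Int),
       c + ((l.filter (pvHit pvNum3)).length : Int)) := by
  induction l generalizing a b c with
  | nil => simp
  | cons x t ih =>
    simp only [List.foldl_cons, List.filter_cons, ih]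
    split_ifs <;> simp [Prod.ext_iff] <;> omega

-- B's 40 bucket lookups for a pattern whose length divides 40 recover the filter-count.
theorem pv_score_eq (pat : List Int) (hdvd : ((pat.length : Int)) ∣ 40)
    (hpos : 0 < pat.length) (l : List (Int × Int)) :
    ((PySem.List.pyRange 0 40 1).map
      (fun r => ((l.map (fun q => (PySem.Int.mod q.1 40, q.2))).count (r, pvPatAt pat r) : Int))).sum
    = ((l.filter (pvHit pat)).length : Int) := by
  induction l with
  | nil => simp
  | cons p t ih =>
    have hcnt : (PySem.List.pyRange 0 40 1).map
        (fun r => ((((p :: t).map (fun q => (PySem.Int.mod q.1 40, q.2))).count (r, pvPatAt pat r)) : Int))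
      = (PySem.List.pyRange 0 40 1).map
        (fun r => (((t.map (fun q => (PySem.Int.mod q.1 40, q.2))).count (r, pvPatAt pat r)) : Int)
          + (if (PySem.Int.mod p.1 40, p.2) = (r, pvPatAt pat r) then 1 else 0)) := by
      refine List.map_congr_left (fun r _ => ?_)
      simp only [List.map_cons, List.count_cons]
      split_ifs with h <;> simp_all
    rw [hcnt, PySem.List.sum_map_add_int, ih]
    -- the indicator sum over r picks out r = p.1 % 40
    have h40 : (0:Int) < 40 := by norm_num
    have hm0 : 0 ≤ PySem.Int.mod p.1 40 := PySem.Int.mod_nonneg _ h40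
    have hmlt : PySem.Int.mod p.1 40 < 40 := PySem.Int.mod_lt _ h40
    have hpm : pvPatAt pat (PySem.Int.mod p.1 40) = pvPatAt pat p.1 := by
      unfold pvPatAt
      congr 1
      rw [PySem.Int.mod_eq_emod_of_pos (show (0:Int) < (pat.length : Int) by exact_mod_cast hpos),
          PySem.Int.mod_eq_emod_of_pos (show (0:Int) < (pat.length : Int) by exact_mod_cast hpos),
          PySem.Int.mod_eq_emod_of_pos h40]
      exact Int.emod_emod_of_dvd _ hdvd
    have hkey : ((PySem.List.pyRange 0 40 1).map
        (fun r => ((if ((PySem.Int.mod p.1 40, p.2) = (r, pvPatAt pat r)) then 1 else 0) : Int))).sum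
        = if pvHit pat p then 1 else 0 := by
      have hrange : PySem.List.pyRange 0 40 1 = (List.range 40).map (fun x => ((x : Nat) : Int)) := by
        decide
      rw [hrange, List.map_map]
      set m : Nat := (PySem.Int.mod p.1 40).toNat with hmdef
      have hmv : (m : Int) = PySem.Int.mod p.1 40 := Int.toNat_of_nonneg hm0
      have hmlt' : m < 40 := by omega
      have hsum : ∀ (n : Nat), ((List.range n).map
          ((fun r => ((if ((PySem.Int.mod p.1 40, p.2) = (r, pvPatAt pat r)) then 1 else 0) : Int)) ∘ (fun x => ((x : Nat) : Int)))).sum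
          = if m < n ∧ p.2 = pvPatAt pat (m:Int) then 1 else 0 := by
        intro n
        induction n with
        | zero => simp
        | succ n ihn =>
          rw [List.range_succ, List.map_append, List.sum_append, ihn]
          simp only [List.map_cons, List.map_nil, List.sum_cons, List.sum_nil, Function.comp,
            add_zero]
          by_cases hn : m = n
          · subst hn
            have hnot : ¬ (m < m ∧ p.2 = pvPatAt pat (m:Int)) := fun h => absurd h.1 (lt_irrefl m)
            rw [if_neg hnot]
            by_cases hp : p.2 = pvPatAt pat (m:Int)
            · have hc1 : m < m + 1 ∧ p.2 = pvPatAt pat (m:Int) := ⟨by omega, hp⟩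
              have hc2 : (PySem.Int.mod p.1 40, p.2) = ((m:Int), pvPatAt pat ((m:Int))) := by
                rw [← hmv]
                exact congrArg _ hp
              rw [if_pos hc2, if_pos hc1]
              ring
            · have hd1 : ¬ (m < m + 1 ∧ p.2 = pvPatAt pat (m:Int)) := fun h => hp h.2
              have hd2 : ¬ ((PySem.Int.mod p.1 40, p.2) = ((m:Int), pvPatAt pat ((m:Int)))) := by
                intro h
                exact hp (congrArg Prod.snd h)
              rw [if_neg hd2, if_neg hd1]
              ring
          · have hd2 : ¬ ((PySem.Int.mod p.1 40, p.2) = ((n:Int), pvPatAt pat ((n:Int)))) := by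
              intro h
              have h1 : PySem.Int.mod p.1 40 = (n:Int) := congrArg Prod.fst h
              rw [← hmv] at h1
              exact hn (by exact_mod_cast h1)
            rw [if_neg hd2]
            have hiff : (m < n + 1 ∧ p.2 = pvPatAt pat (m:Int)) ↔ (m < n ∧ p.2 = pvPatAt pat (m:Int)) :=
              ⟨fun h => ⟨by omega, h.2⟩, fun h => ⟨by omega, h.2⟩⟩
            rw [if_congr hiff rfl rfl]
            ring
      rw [hsum 40]
      unfold pvHit
      have hpm' : pvPatAt pat (m:Int) = pvPatAt pat p.1 := by rw [hmv]; exact hpm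
      by_cases hv : pvPatAt pat p.1 = p.2
      · have hc : m < 40 ∧ p.2 = pvPatAt pat (m:Int) := ⟨hmlt', by rw [hpm']; exact hv.symm⟩
        rw [if_pos hc, if_pos (by simpa using hv)]
      · rw [if_neg (fun h => hv (hpm' ▸ h.2).symm), if_neg (by simpa using hv)]
    rw [hkey, List.filter_cons]
    by_cases hh : pvHit pat p = true
    · simp only [if_pos hh, List.length_cons]
      push_cast
      ring
    · simp only [if_neg hh]
      ring

-- A's max_score/result loop (seeded with -1) equals max-then-filter, for nonnegative first score.
theorem pv_select (s1 s2 s3 : Int) (h1 : 0 ≤ s1) :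
    (([((1 : Int), s1), (2, s2), (3, s3)]).foldl
      (fun (st : Int × List Int) q =>
        if st.1 < q.2 then (q.2, [q.1])
        else if st.1 == q.2 then (st.1, st.2 ++ [q.1])
        else st) (-1, [])).2
    = ((List.range 3).filter (fun i => ([s1, s2, s3] : List Int).getD i 0 == max (max s1 s2) s3)).map
        (fun i => (i : Int) + 1) := by
  have hm1 : (-1 : Int) < s1 := by omega
  simp only [List.foldl_cons, List.foldl_nil, if_pos hm1, List.range_succ, List.range_zero,
    List.nil_append, List.filter_append, List.filter_cons, List.filter_nil]
  rcases lt_trichotomy s1 s2 with h12 | h12 | h12 <;>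
    rcases lt_trichotomy (max s1 s2) s3 with h3 | h3 | h3
  · simp [h12, show s2 < s3 by omega, show max (max s1 s2) s3 = s3 by omega,
      show s1 ≠ s3 by omega, show s2 ≠ s3 by omega]
  · simp [show s2 = s3 by omega, show s1 ≠ s3 by omega,
      show s1 < s3 by omega,
      show s1 ≤ s3 by omega]
  · simp [h12, show ¬ s2 < s3 by omega, show s2 ≠ s3 by omega, show s1 ≠ s2 by omega,
      show s3 ≠ s2 by omega, show max (max s1 s2) s3 = s2 by omega]
  · simp [h12, show s2 < s3 by omega,
      show s2 ≠ s3 by omega, show s2 ≤ s3 by omega]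
  · simp [h12, show s2 = s3 by omega]
  · simp [h12, show ¬ s2 < s3 by omega, show s2 ≠ s3 by omega, show s3 ≠ s2 by omega,
      show s3 ≤ s2 by omega]
  · simp [show ¬ s1 < s2 by omega, show s1 ≠ s2 by omega, show s1 < s3 by omega,
      show max (max s1 s2) s3 = s3 by omega, show s2 ≠ s3 by omega, show s1 ≠ s3 by omega]
  · simp [show s1 = s3 by omega, show s2 ≠ s3 by omega,
      show ¬ s3 < s2 by omega, show s3 ≠ s2 by omega, show s2 ≤ s3 by omega]
  · simp [show ¬ s1 < s2 by omega, show s1 ≠ s2 by omega, show ¬ s1 < s3 by omega,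
      show s1 ≠ s3 by omega, show max (max s1 s2) s3 = s1 by omega, show s2 ≠ s1 by omega,
      show s3 ≠ s1 by omega]

-- ===== VERDICT (by name: the statement is the Claim_ definition above) =====
theorem solution_spec : Claim_equal_solution := by
  intro answers _
  unfold Spec_solution solution solution_alt pvBucket pvScore
  have hgetD : ∀ (k : Int × Int),
      ((PySem.List.enumerate answers 0).foldl
        (fun d p =>
          let k := (PySem.Int.mod p.1 40, p.2)
          d.insert k (d.getD k 0 + 1)) PySem.Dict.empty).getD k 0
      = (((PySem.List.enumerate answers 0).map (fun q => (PySem.Int.mod q.1 40, q.2))).count k : Int) := by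
    intro k
    have hfold :
        (((PySem.List.enumerate answers 0).map (fun q => (PySem.Int.mod q.1 40, q.2))).foldl
          (fun (d : PySem.Dict (Int × Int) Int) x => d.insert x (d.getD x 0 + 1)) PySem.Dict.empty)
        = ((PySem.List.enumerate answers 0).foldl
          (fun d p =>
            let k := (PySem.Int.mod p.1 40, p.2)
            d.insert k (d.getD k 0 + 1)) PySem.Dict.empty) :=
      List.foldl_map
    rw [← hfold, PySem.Dict.getD_foldl_insert_add_one]
    simp [PySem.Dict.getD_empty]
  have hs1 := pv_score_eq pvNum1 (by norm_num [pvNum1]) (by norm_num [pvNum1]) (PySem.List.enumerate answers 0)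
  have hs2 := pv_score_eq pvNum2 (by norm_num [pvNum2]) (by norm_num [pvNum2]) (PySem.List.enumerate answers 0)
  have hs3 := pv_score_eq pvNum3 (by norm_num [pvNum3]) (by norm_num [pvNum3]) (PySem.List.enumerate answers 0)
  simp only [hgetD]
  simp only [pv_count_fold]
  simp only [hs1, hs2, hs3, zero_add]
  rw [PySem.List.max?_id_cons]
  simp only [List.foldl_cons, List.foldl_nil, Option.getD_some]
  exact pv_select _ _ _ (Int.natCast_nonneg _)
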